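-- pv_equiv track=rewrite | github.com/miloliem-stack/my-garden-logs | src/run_bot.py | format_startup_recovery_summary
-- ===== SOURCE A (Python) =====
-- def format_startup_recovery_summary(report: list[dict]) -> str:
--     total = len(report or [])
--     recovered = 0
--     canceled = 0
--     not_found = 0
--     still_unknown = 0
--     for item in report or []:
--         status = str(item.get('status') or '').lower()
--         if status in {'submitted', 'open', 'partially_filled', 'filled'}:
--             recovered += 1
--         elif status in {'canceled', 'expired'}:
--             canceled += 1
--         elif status == 'not_found_on_venue':
--             not_found += 1
--         elif status == 'unknown':
--             still_unknown += 1
--     return (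
--         f'Startup order recovery | total={total} recovered={recovered} '
--         f'canceled={canceled} not_found={not_found} still_unknown={still_unknown}'
--     )
-- ===== SOURCE B (Python) =====
-- def format_startup_recovery_summary(report: list[dict]) -> str:
--     items = report or []
--     statuses = [str(item.get('status') or '').lower() for item in items]
--     counts = {}
--     for s in statuses:
--         counts[s] = counts.get(s, 0) + 1
--     recovered = sum(counts.get(s, 0) for s in ('submitted', 'open', 'partially_filled', 'filled'))
--     canceled = sum(counts.get(s, 0) for s in ('canceled', 'expired'))
--     not_found = counts.get('not_found_on_venue', 0)
--     still_unknown = counts.get('unknown', 0)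
--     return (
--         f'Startup order recovery | total={len(items)} recovered={recovered} '
--         f'canceled={canceled} not_found={not_found} still_unknown={still_unknown}'
--     )
-- ===== Notes on version B (the rewrite author's own statement) =====
-- stated objective: idiomatic
-- what changed: Replaced the per-item if/elif bucket dispatch with tabulate-then-aggregate: one pass builds a frequency table of normalized statuses, then each bucket is a sum of table lookups over its status set.
import Mathlib
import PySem

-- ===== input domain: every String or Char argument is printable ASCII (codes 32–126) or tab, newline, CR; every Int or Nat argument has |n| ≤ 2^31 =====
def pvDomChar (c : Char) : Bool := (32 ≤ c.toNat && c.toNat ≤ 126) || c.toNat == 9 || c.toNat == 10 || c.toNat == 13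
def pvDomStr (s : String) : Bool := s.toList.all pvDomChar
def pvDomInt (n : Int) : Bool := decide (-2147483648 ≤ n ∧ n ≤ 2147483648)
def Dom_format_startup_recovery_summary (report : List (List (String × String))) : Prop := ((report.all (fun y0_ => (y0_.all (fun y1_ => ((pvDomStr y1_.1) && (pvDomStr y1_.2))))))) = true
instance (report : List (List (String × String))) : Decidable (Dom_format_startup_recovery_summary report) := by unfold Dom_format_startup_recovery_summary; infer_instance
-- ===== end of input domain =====

-- B replaces A's per-item if/elif bucket dispatch by one frequency table of normalized
-- statuses plus a lookup-sum per bucket (tabulate-then-aggregate); objective: idiomatic.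

-- ===== PORT A =====
-- status = str(item.get('status') or '').lower()  ('or' collapses a missing key and '' alike to '')
def pvNormStatus (item : List (String × String)) : String :=
  PySem.Str.lower ((PySem.Dict.mk item).getD "status" "")

-- the f-string (shared literal formatting, identical in both Pythons)
def pvFormat (total recovered canceled notFound stillUnknown : Int) : String :=
  "Startup order recovery | total=" ++ PySem.Int.toStr total ++
  " recovered=" ++ PySem.Int.toStr recovered ++
  " canceled=" ++ PySem.Int.toStr canceled ++
  " not_found=" ++ PySem.Int.toStr notFound ++
  " still_unknown=" ++ PySem.Int.toStr stillUnknown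

-- loop body of A: state (recovered, canceled, not_found, still_unknown)
def pvStepA (st : Int × Int × Int × Int) (item : List (String × String)) : Int × Int × Int × Int :=
  let s := pvNormStatus item
  if s == "submitted" || s == "open" || s == "partially_filled" || s == "filled" then
    (st.1 + 1, st.2.1, st.2.2.1, st.2.2.2)
  else if s == "canceled" || s == "expired" then
    (st.1, st.2.1 + 1, st.2.2.1, st.2.2.2)
  else if s == "not_found_on_venue" then
    (st.1, st.2.1, st.2.2.1 + 1, st.2.2.2)
  else if s == "unknown" then
    (st.1, st.2.1, st.2.2.1, st.2.2.2 + 1)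
  else st

def format_startup_recovery_summary (report : List (List (String × String))) : String :=
  let total : Int := report.length
  let st := report.foldl pvStepA (0, 0, 0, 0)
  pvFormat total st.1 st.2.1 st.2.2.1 st.2.2.2

-- ===== PORT B =====
def format_startup_recovery_summary_alt (report : List (List (String × String))) : String :=
  let statuses := report.map pvNormStatus
  let counts := statuses.foldl (fun d s => d.insert s (d.getD s 0 + 1)) (PySem.Dict.empty : PySem.Dict String Int)
  let recovered := (["submitted", "open", "partially_filled", "filled"]).foldl (fun a s => a + counts.getD s 0) 0
  let canceled := (["canceled", "expired"]).foldl (fun a s => a + counts.getD s 0) 0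
  let notFound := counts.getD "not_found_on_venue" 0
  let stillUnknown := counts.getD "unknown" 0
  pvFormat report.length recovered canceled notFound stillUnknown

-- ===== PRECONDITION & SPEC =====
def Spec_format_startup_recovery_summary (report : List (List (String × String))) (out : String) : Prop := out = format_startup_recovery_summary_alt report
instance (report : List (List (String × String))) (out : String) : Decidable (Spec_format_startup_recovery_summary report out) := by unfold Spec_format_startup_recovery_summary; infer_instance

-- ===== CLAIM (what is proved, stated in full; the proofs are below) =====
def Claim_equal_format_startup_recovery_summary : Prop := ∀ (report : List (List (String × String))), Dom_format_startup_recovery_summary report → Spec_format_startup_recovery_summary report (format_startup_recovery_summary report)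

-- ===== LEMMAS AND PROOFS =====
-- A's fold counts, per bucket, exactly the occurrences of each status in the normalized list
lemma pvLoopA_eq (l : List (List (String × String))) (r c n u : Int) :
    l.foldl pvStepA (r, c, n, u) =
      (r + ((l.map pvNormStatus).count "submitted" : Int)
         + ((l.map pvNormStatus).count "open" : Int)
         + ((l.map pvNormStatus).count "partially_filled" : Int)
         + ((l.map pvNormStatus).count "filled" : Int),
       c + ((l.map pvNormStatus).count "canceled" : Int)
         + ((l.map pvNormStatus).count "expired" : Int),
       n + ((l.map pvNormStatus).count "not_found_on_venue" : Int),
       u + ((l.map pvNormStatus).count "unknown" : Int)) := by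
  induction l generalizing r c n u with
  | nil => simp
  | cons a t ih =>
    simp only [List.foldl_cons, List.map_cons, List.count_cons]
    by_cases e1 : pvNormStatus a = "submitted"
    · simp [pvStepA, e1, ih, Prod.ext_iff]
      all_goals and_intros
      all_goals (push_cast; ring)
    by_cases e2 : pvNormStatus a = "open"
    · simp [pvStepA, e1, Ne.symm e1, e2, ih, Prod.ext_iff]
      all_goals and_intros
      all_goals (push_cast; ring)
    by_cases e3 : pvNormStatus a = "partially_filled"
    · simp [pvStepA, e1, Ne.symm e1, e2, Ne.symm e2, e3, ih, Prod.ext_iff]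
      all_goals and_intros
      all_goals (push_cast; ring)
    by_cases e4 : pvNormStatus a = "filled"
    · simp [pvStepA, e1, Ne.symm e1, e2, Ne.symm e2, e3, Ne.symm e3, e4, ih, Prod.ext_iff]
      all_goals and_intros
      all_goals (push_cast; ring)
    by_cases e5 : pvNormStatus a = "canceled"
    · simp [pvStepA, e1, Ne.symm e1, e2, Ne.symm e2, e3, Ne.symm e3, e4, Ne.symm e4, e5, ih, Prod.ext_iff]
      all_goals and_intros
      all_goals (push_cast; ring)
    by_cases e6 : pvNormStatus a = "expired"
    · simp [pvStepA, e1, Ne.symm e1, e2, Ne.symm e2, e3, Ne.symm e3, e4, Ne.symm e4, e5, Ne.symm e5, e6, ih, Prod.ext_iff]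
      all_goals and_intros
      all_goals (push_cast; ring)
    by_cases e7 : pvNormStatus a = "not_found_on_venue"
    · simp [pvStepA, e1, Ne.symm e1, e2, Ne.symm e2, e3, Ne.symm e3, e4, Ne.symm e4, e5, Ne.symm e5, e6, Ne.symm e6, e7, ih, Prod.ext_iff]
      all_goals and_intros
      all_goals (push_cast; ring)
    by_cases e8 : pvNormStatus a = "unknown"
    · simp [pvStepA, e1, Ne.symm e1, e2, Ne.symm e2, e3, Ne.symm e3, e4, Ne.symm e4, e5, Ne.symm e5, e6, Ne.symm e6, e7, Ne.symm e7, e8, ih, Prod.ext_iff]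
      all_goals and_intros
      all_goals (push_cast; ring)
    · simp [pvStepA, e1, Ne.symm e1, e2, Ne.symm e2, e3, Ne.symm e3, e4, Ne.symm e4, e5, Ne.symm e5, e6, Ne.symm e6, e7, Ne.symm e7, e8, Ne.symm e8, ih, Prod.ext_iff]
      all_goals and_intros
      all_goals (push_cast; ring)

-- ===== VERDICT (by name: the statement is the Claim_ definition above) =====
theorem format_startup_recovery_summary_spec : Claim_equal_format_startup_recovery_summary := by
  intro report _
  show _ = _
  unfold format_startup_recovery_summary format_startup_recovery_summary_alt
  simp only [pvLoopA_eq, PySem.Dict.getD_foldl_insert_add_one, PySem.Dict.getD_empty,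
    List.foldl_cons, List.foldl_nil]
  congr 1 <;> ring
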